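-- pv_equiv track=rewrite | github.com/wlhunter00/AM-Automated-Opportunity-Capture | RFPDB/RFPDB Web Scraping Attempt 2.py | calculatePageNumber
-- ===== SOURCE A (Python) =====
-- def calculatePageNumber(numberOfPages, jobsPerPage, site):
--     if(site == 'NYSCR'):
--         runningCounter = 1
--         startNum = [str(1)]
--         for num in range(0, numberOfPages-1):
--             runningCounter += jobsPerPage
--             startNum.append(str(runningCounter))
--     elif(site == 'DASNY'):
--         runningCounter = 0
--         startNum = [str(0)]
--         for num in range(0, numberOfPages-1):
--             runningCounter += 1
--             startNum.append(str(runningCounter))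
--     elif(site == 'GOVUK' or site == 'RFPDB'):
--         runningCounter = 1
--         startNum = [str(1)]
--         for num in range(0, numberOfPages-1):
--             runningCounter += 1
--             startNum.append(str(runningCounter))
--     return startNum
-- ===== SOURCE B (Python) =====
-- def calculatePageNumber(numberOfPages, jobsPerPage, site):
--     start, step = {'NYSCR': (1, jobsPerPage),
--                    'DASNY': (0, 1),
--                    'GOVUK': (1, 1),
--                    'RFPDB': (1, 1)}[site]
--     count = max(numberOfPages, 1)
--     return [str(start + i * step) for i in range(count)]
-- ===== Notes on version B (the rewrite author's own statement) =====
-- stated objective: simpler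
-- what changed: Replaces the three near-identical running-counter loops by a per-site (start, step) table and a single closed-form comprehension [str(start + i*step) for i in range(max(numberOfPages,1))].
import Mathlib
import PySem

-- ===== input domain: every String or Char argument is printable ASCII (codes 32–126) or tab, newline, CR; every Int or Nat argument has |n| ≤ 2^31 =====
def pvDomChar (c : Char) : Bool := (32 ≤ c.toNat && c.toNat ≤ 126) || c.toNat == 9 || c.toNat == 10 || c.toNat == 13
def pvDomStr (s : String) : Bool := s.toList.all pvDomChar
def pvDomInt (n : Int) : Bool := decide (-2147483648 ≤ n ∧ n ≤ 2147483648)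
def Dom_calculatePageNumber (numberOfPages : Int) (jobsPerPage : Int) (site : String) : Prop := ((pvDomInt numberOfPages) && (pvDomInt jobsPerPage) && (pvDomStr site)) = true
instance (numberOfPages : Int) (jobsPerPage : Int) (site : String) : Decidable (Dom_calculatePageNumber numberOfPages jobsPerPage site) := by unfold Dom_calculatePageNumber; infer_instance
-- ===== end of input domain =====

-- B replaces A's three near-identical running-counter loops by a per-site (start, step)
-- table and one closed-form comprehension; equivalence proved on all recognized sites.


-- ===== PORT A =====
-- Literal transliteration of A: each branch keeps a running counter and appends str(counter).
def calculatePageNumber (numberOfPages : Int) (jobsPerPage : Int) (site : String) : List String :=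
  if site == "NYSCR" then
    ((PySem.List.pyRange 0 (numberOfPages - 1) 1).foldl
      (fun (st : Int × List String) _ =>
        (st.1 + jobsPerPage, st.2 ++ [PySem.Int.toStr (st.1 + jobsPerPage)]))
      (1, [PySem.Int.toStr 1])).2
  else if site == "DASNY" then
    ((PySem.List.pyRange 0 (numberOfPages - 1) 1).foldl
      (fun (st : Int × List String) _ =>
        (st.1 + 1, st.2 ++ [PySem.Int.toStr (st.1 + 1)]))
      (0, [PySem.Int.toStr 0])).2
  else if site == "GOVUK" || site == "RFPDB" then
    ((PySem.List.pyRange 0 (numberOfPages - 1) 1).foldl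
      (fun (st : Int × List String) _ =>
        (st.1 + 1, st.2 ++ [PySem.Int.toStr (st.1 + 1)]))
      (1, [PySem.Int.toStr 1])).2
  else []  -- Python raises UnboundLocalError here; excluded by Pre_

-- ===== PORT B =====
def calculatePageNumber_alt (numberOfPages : Int) (jobsPerPage : Int) (site : String) : List String :=
  match (PySem.Dict.ofList [("NYSCR", ((1 : Int), jobsPerPage)),
                            ("DASNY", ((0 : Int), (1 : Int))),
                            ("GOVUK", ((1 : Int), (1 : Int))),
                            ("RFPDB", ((1 : Int), (1 : Int)))]).get? site with
  | none => []  -- Python raises KeyError here; excluded by Pre_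
  | some (start, step) =>
    (PySem.List.pyRange 0 (max numberOfPages 1) 1).map
      (fun i => PySem.Int.toStr (start + i * step))

-- ===== PRECONDITION & SPEC =====
-- A raises UnboundLocalError (and B KeyError) for unrecognized sites; Pre_ admits the four sites the code handles.
def Pre_calculatePageNumber (numberOfPages : Int) (jobsPerPage : Int) (site : String) : Prop :=
  site = "NYSCR" ∨ site = "DASNY" ∨ site = "GOVUK" ∨ site = "RFPDB"
instance (numberOfPages : Int) (jobsPerPage : Int) (site : String) : Decidable (Pre_calculatePageNumber numberOfPages jobsPerPage site) := by unfold Pre_calculatePageNumber; infer_instance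

def pvWitness_calculatePageNumber : Int × Int × String := (3, 25, "NYSCR")

def Spec_calculatePageNumber (numberOfPages : Int) (jobsPerPage : Int) (site : String) (out : List String) : Prop := out = calculatePageNumber_alt numberOfPages jobsPerPage site
instance (numberOfPages : Int) (jobsPerPage : Int) (site : String) (out : List String) : Decidable (Spec_calculatePageNumber numberOfPages jobsPerPage site out) := by unfold Spec_calculatePageNumber; infer_instance

-- ===== CLAIM (what is proved, stated in full; the proofs are below) =====
def Claim_equal_calculatePageNumber : Prop := ∀ (numberOfPages : Int) (jobsPerPage : Int) (site : String), Dom_calculatePageNumber numberOfPages jobsPerPage site → Pre_calculatePageNumber numberOfPages jobsPerPage site → Spec_calculatePageNumber numberOfPages jobsPerPage site (calculatePageNumber numberOfPages jobsPerPage site)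

-- ===== LEMMAS AND PROOFS =====

-- map over range (n+1) splits into head and shifted tail.
lemma map_range_succ (f : Nat → String) (n : Nat) :
    (List.range (n + 1)).map f = f 0 :: (List.range n).map (fun k => f (k + 1)) := by
  rw [List.range_succ_eq_map]
  simp [Function.comp_def]

-- The accumulator loop, over any list (the loop variable is unused), produces the closed form.
lemma foldA (step : Int) : ∀ (l : List Int) (c : Int) (acc : List String),
    (l.foldl (fun (st : Int × List String) _ =>
        (st.1 + step, st.2 ++ [PySem.Int.toStr (st.1 + step)])) (c, acc)).2
      = acc ++ (List.range l.length).map (fun k : Nat => PySem.Int.toStr (c + step * ((k : Int) + 1))) := by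
  intro l
  induction l with
  | nil => intro c acc; simp
  | cons x xs ih =>
    intro c acc
    simp only [List.foldl_cons, List.length_cons, ih]
    rw [map_range_succ]
    simp only [List.append_assoc, List.singleton_append]
    congr 2
    · norm_num
    · refine List.map_congr_left fun k _ => ?_
      congr 1
      push_cast
      ring

-- One branch: A's "[str c] then append str(c+step) n-1 times" equals B's closed form for (c, step).
lemma branch_eq (n c step : Int) :
    PySem.Int.toStr c ::
      (List.range (PySem.List.pyRange 0 (n - 1) 1).length).map
        (fun k : Nat => PySem.Int.toStr (c + step * ((k : Int) + 1)))
      = (PySem.List.pyRange 0 (max n 1) 1).map (fun i => PySem.Int.toStr (c + i * step)) := by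
  rw [PySem.List.length_pyRange_one, PySem.List.pyRange_one]
  simp only [List.map_map]
  have h : (max n 1 - 0).toNat = (n - 1 - 0).toNat + 1 := by omega
  rw [h, map_range_succ]
  congr 1
  · simp
  · refine List.map_congr_left fun k _ => ?_
    simp only [Function.comp_apply]
    congr 1
    push_cast
    ring

-- ===== VERDICT (by name: the statement is the Claim_ definition above) =====
theorem calculatePageNumber_spec : Claim_equal_calculatePageNumber := by
  intro n jpp site _ hpre
  unfold Spec_calculatePageNumber calculatePageNumber calculatePageNumber_alt
  rcases hpre with h | h | h | h <;> subst h <;>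
    simp only [beq_self_eq_true, String.reduceBEq, Bool.or_self, Bool.true_or,
      Bool.or_true, PySem.Dict.ofList, if_pos, foldA] <;>
    exact branch_eq _ _ _
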